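-- pv_equiv track=rewrite | github.com/seansio1995/codefights | rounder.py | rounders
-- ===== SOURCE A (Python) =====
-- def rounders(value):
--     count=0
--     while value >= 10:
--         tail=value%10
--         if tail < 5:
--             value-=tail
--         else:
--             value+=(10-tail)
--         count+=1
--         value//=10
--     return value*10**count
-- ===== SOURCE B (Python) =====
-- def _pow10(v):
--     # largest power of 10 that is <= v, for v >= 10
--     return 10 if v < 100 else 10 * _pow10(v // 10)
--
--
-- def rounders(value):
--     if value < 10:
--         return value
--     p = _pow10(value)
--     lead, tail = divmod(value, p)
--     # the cascading carry fires exactly when tail >= 44...45, i.e. 9*tail >= 4*p+5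
--     return (lead + (1 if 9 * tail >= 4 * p + 5 else 0)) * p
-- ===== Notes on version B (the rewrite author's own statement) =====
-- stated objective: alternative
-- what changed: Replaces the digit-by-digit cascading round loop with a closed form: find the leading power of ten p, then add the carry in one shot iff the tail satisfies 9*tail >= 4*p+5 (i.e. tail >= 44...45), proved equivalent via a mod-9 argument.
import Mathlib
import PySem

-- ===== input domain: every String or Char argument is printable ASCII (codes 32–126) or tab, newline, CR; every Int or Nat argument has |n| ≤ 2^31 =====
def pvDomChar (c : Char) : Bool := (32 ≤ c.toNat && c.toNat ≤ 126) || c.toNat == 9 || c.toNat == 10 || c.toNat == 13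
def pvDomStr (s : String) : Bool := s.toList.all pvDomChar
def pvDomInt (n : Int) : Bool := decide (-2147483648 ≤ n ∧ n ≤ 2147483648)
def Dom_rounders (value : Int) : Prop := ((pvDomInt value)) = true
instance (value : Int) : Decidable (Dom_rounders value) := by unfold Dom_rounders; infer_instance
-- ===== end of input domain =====

-- B replaces A's digit-by-digit cascading round loop with a closed form:
-- the leading power of ten p plus a single threshold test (9*tail >= 4*p+5) for the carry.


-- ===== PORT A =====
-- the while loop, carrying (value, count); returns the final pair
def roundersLoop (value : Int) (count : Nat) : Int × Nat :=
  if h : value ≥ 10 then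
    let tail := PySem.Int.mod value 10
    let value' := if tail < 5 then value - tail else value + (10 - tail)
    roundersLoop (PySem.Int.floordiv value' 10) (count + 1)
  else
    (value, count)
termination_by value.toNat
decreasing_by
  simp only [PySem.Int.mod_eq_emod_of_pos (by omega : (0:Int) < 10),
             PySem.Int.floordiv_eq_ediv_of_pos (by omega : (0:Int) < 10)]
  have h1 := Int.emod_nonneg value (by omega : (10:Int) ≠ 0)
  split <;> omega

def rounders (value : Int) : Int :=
  let r := roundersLoop value 0
  r.1 * 10 ^ r.2

-- ===== PORT B =====
-- _pow10: largest power of 10 that is <= v, for v >= 10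
def pow10B (v : Int) : Int :=
  if h : v < 100 then 10 else 10 * pow10B (PySem.Int.floordiv v 10)
termination_by v.toNat
decreasing_by
  simp only [PySem.Int.floordiv_eq_ediv_of_pos (by omega : (0:Int) < 10)]
  have h1 := Int.emod_nonneg v (by omega : (10:Int) ≠ 0)
  have h2 := Int.emod_lt_of_pos v (by omega : (0:Int) < 10)
  have h3 := Int.ediv_add_emod v 10
  omega

def rounders_alt (value : Int) : Int :=
  if value < 10 then value
  else
    let p := pow10B value
    let lead := PySem.Int.floordiv value p
    let tail := PySem.Int.mod value p
    (lead + (if 9 * tail ≥ 4 * p + 5 then 1 else 0)) * p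

-- ===== PRECONDITION & SPEC =====
def Spec_rounders (value : Int) (out : Int) : Prop := out = rounders_alt value
instance (value : Int) (out : Int) : Decidable (Spec_rounders value out) := by unfold Spec_rounders; infer_instance

-- ===== CLAIM (what is proved, stated in full; the proofs are below) =====
def Claim_equal_rounders : Prop := ∀ (value : Int), Dom_rounders value → Spec_rounders value (rounders value)

-- ===== LEMMAS AND PROOFS =====

-- recursive characterisation of A's loop (proof helper only)
def gRec (value : Int) : Int :=
  if h : value < 10 then value
  else
    let tail := PySem.Int.mod value 10
    let v := if tail < 5 then value - tail else value + (10 - tail)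
    gRec (PySem.Int.floordiv v 10) * 10
termination_by value.toNat
decreasing_by
  simp only [PySem.Int.mod_eq_emod_of_pos (by omega : (0:Int) < 10),
             PySem.Int.floordiv_eq_ediv_of_pos (by omega : (0:Int) < 10)]
  have h1 := Int.emod_nonneg value (by omega : (10:Int) ≠ 0)
  split <;> omega

theorem gRec_small (value : Int) (h : value < 10) : gRec value = value := by
  rw [gRec]; simp [h]

-- loop invariant: the loop's result, scaled by 10^count it started with, is gRec's value times that scale
theorem roundersLoop_eq (n : Nat) : ∀ (value : Int), value.toNat ≤ n → ∀ (count : Nat),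
    (roundersLoop value count).1 * 10 ^ (roundersLoop value count).2
      = gRec value * 10 ^ count := by
  induction n with
  | zero =>
    intro value hv count
    have hlt : value < 10 := by omega
    rw [roundersLoop, gRec]
    simp [hlt, not_le.mpr hlt]
  | succ n ih =>
    intro value hv count
    rw [roundersLoop, gRec]
    by_cases h : value ≥ 10
    · simp only [h, dite_true, not_lt.mpr h, dite_false]
      have hm := PySem.Int.mod_eq_emod_of_pos (a := value) (by omega : (0:Int) < 10)
      have hd : ∀ a : Int, PySem.Int.floordiv a 10 = a / 10 :=
        fun a => PySem.Int.floordiv_eq_ediv_of_pos (by omega : (0:Int) < 10)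
      have h1 := Int.emod_nonneg value (by omega : (10:Int) ≠ 0)
      have h2 := Int.emod_lt_of_pos value (by omega : (0:Int) < 10)
      set value' := if PySem.Int.mod value 10 < 5 then value - PySem.Int.mod value 10
                    else value + (10 - PySem.Int.mod value 10) with hval'
      have hsmall : (PySem.Int.floordiv value' 10).toNat ≤ n := by
        rw [hd]
        have hb : value' ≤ value + 5 ∧ 1 ≤ value' := by
          rw [hval', hm]; split <;> omega
        have := Int.ediv_le_ediv (by omega : (0:Int) < 10) hb.1
        have := Int.ediv_nonneg (by omega : (0:Int) ≤ value') (by omega : (0:Int) ≤ 10)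
        omega
      have := ih (PySem.Int.floordiv value' 10) hsmall (count + 1)
      rw [this]
      ring
    · simp [h, not_le.mp h]

theorem pow10_mod9 (k : Nat) : (10:Int) ^ k % 9 = 1 := by
  induction k with
  | zero => decide
  | succ k ih => rw [pow_succ]; omega

-- pow10B spec: for v ≥ 10 it returns 10^k with 10^k ≤ v < 10^(k+1)
theorem pow10B_spec (n : Nat) : ∀ (v : Int), v.toNat ≤ n → 10 ≤ v →
    ∃ k : Nat, 1 ≤ k ∧ pow10B v = 10 ^ k ∧ 10 ^ k ≤ v ∧ v < 10 ^ (k + 1) := by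
  induction n with
  | zero => intro v hv h10; omega
  | succ n ih =>
    intro v hv h10
    rw [pow10B]
    by_cases h : v < 100
    · exact ⟨1, by omega, by simp [h], by omega, by norm_num; omega⟩
    · simp only [h, dite_false]
      rw [PySem.Int.floordiv_eq_ediv_of_pos (by omega : (0:Int) < 10)]
      have hdm := Int.ediv_add_emod v 10
      have hm1 := Int.emod_nonneg v (by omega : (10:Int) ≠ 0)
      have hm2 := Int.emod_lt_of_pos v (by omega : (0:Int) < 10)
      obtain ⟨k, hk1, hkp, hkl, hku⟩ := ih (v / 10) (by omega) (by omega)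
      refine ⟨k + 1, by omega, by rw [hkp]; ring, ?_, ?_⟩
      · rw [pow_succ]; omega
      · rw [pow_succ]; omega

-- the single arithmetic step: how the carry threshold at scale P relates to the one at scale 10P
theorem carry_step (P L r s t W u b : Int)
    (hP : 1 ≤ P) (h9 : P % 9 = 1)
    (hr1 : 0 ≤ r) (hr2 : r < 10 * P)
    (ht1 : 0 ≤ t) (ht2 : t < 10)
    (hb : b = if t < 5 then 0 else 1)
    (hrst : r = 10 * s + t)
    (hu1 : 0 ≤ u) (hu2 : u < P)
    (hw : P * W + u = P * L + s + b) :
    (W + (if 9 * u ≥ 4 * P + 5 then 1 else 0)) * P * 10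
      = (L + (if 9 * r ≥ 4 * (10 * P) + 5 then 1 else 0)) * (10 * P) := by
  have hs1 : 0 ≤ s := by omega
  have hs2 : s < P := by omega
  have hbt : b = 0 ∧ t < 5 ∨ b = 1 ∧ 5 ≤ t := by rw [hb]; split <;> omega
  clear hb
  have key : P * (W - L) = s + b - u := by linear_combination hw
  have hd0 : 0 ≤ W - L := by
    by_contra hneg
    have hle : W - L ≤ -1 := by omega
    have h2 : P * (W - L) ≤ P * (-1) := mul_le_mul_of_nonneg_left hle (by omega)
    rw [mul_neg_one] at h2
    omega
  have hd1 : W - L ≤ 1 := by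
    by_contra hgt
    have hle : 2 ≤ W - L := by omega
    have h2 : P * 2 ≤ P * (W - L) := mul_le_mul_of_nonneg_left hle (by omega)
    omega
  have hcase : W = L ∧ u = s + b ∨ W = L + 1 ∧ u = s + b - P := by
    have hor : W - L = 0 ∨ W - L = 1 := by omega
    rcases hor with h | h
    · left
      have hz : P * (W - L) = 0 := by rw [h]; ring
      omega
    · right
      have hz : P * (W - L) = P := by rw [h]; ring
      omega
  rcases hbt with ⟨hb0, ht5⟩ | ⟨hb0, ht5⟩ <;>
    rcases hcase with ⟨hW, hu⟩ | ⟨hW, hu⟩ <;>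
      subst hW <;> subst hb0 <;> split_ifs with hA hB <;>
        first | ring1 | (exfalso; omega)

-- the core closed form: for 10^k ≤ value ≤ 10^(k+1), gRec rounds to
-- (value / 10^k + carry) * 10^k, with carry iff 9*(value mod 10^k) ≥ 4*10^k + 5
theorem gRec_closed (k : Nat) : ∀ (value : Int), 10 ^ k ≤ value → value ≤ 10 ^ (k + 1) →
    gRec value = (value / 10 ^ k + (if 9 * (value % 10 ^ k) ≥ 4 * 10 ^ k + 5 then 1 else 0))
      * 10 ^ k := by
  induction k with
  | zero =>
    intro value h1 h2
    have h1' : (1:Int) ≤ value := by simpa using h1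
    have h2' : value ≤ 10 := by norm_num at h2; omega
    simp only [pow_zero, Int.ediv_one, Int.emod_one, mul_one]
    by_cases h : value < 10
    · rw [gRec_small value h]; norm_num
    · have hv : value = 10 := by omega
      subst hv
      rw [gRec, dif_neg (by norm_num : ¬ (10:Int) < 10)]
      rw [show PySem.Int.mod (10:Int) 10 = 0 by decide]
      norm_num
      exact gRec_small 1 (by norm_num)
  | succ k ih =>
    intro value h1 h2
    have hq : (1:Int) ≤ 10 ^ k := one_le_pow₀ (by omega)
    have hp : (10:Int) ^ (k+1) = 10 * 10 ^ k := by rw [pow_succ]; ring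
    have hp2 : (10:Int) ^ (k+1+1) = 100 * 10 ^ k := by rw [pow_succ, pow_succ]; ring
    rw [gRec]
    have h10 : ¬ value < 10 := by rw [hp] at h1; omega
    simp only [h10, dite_false]
    rw [PySem.Int.mod_eq_emod_of_pos (by omega : (0:Int) < 10),
        PySem.Int.floordiv_eq_ediv_of_pos (by omega : (0:Int) < 10)]
    have ht1 := Int.emod_nonneg value (by omega : (10:Int) ≠ 0)
    have ht2 := Int.emod_lt_of_pos value (by omega : (0:Int) < 10)
    have hdm10 := Int.ediv_add_emod value 10
    set t := value % 10 with htdef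
    set b : Int := if t < 5 then 0 else 1 with hbdef
    have hb01 : 0 ≤ b ∧ b ≤ 1 := by rw [hbdef]; split <;> omega
    have hbt2 : 10 * b ≤ 2 * t := by rw [hbdef]; split <;> omega
    set v' := if t < 5 then value - t else value + (10 - t) with hv'
    have hv10 : v' = 10 * (value / 10 + b) := by
      rw [hv', hbdef]; split <;> omega
    have hwq : v' / 10 = value / 10 + b := by
      rw [hv10, Int.mul_ediv_cancel_left _ (by omega : (10:Int) ≠ 0)]
    set w := v' / 10 with hwdef
    have hwval : 10 * w = value - t + 10 * b := by rw [hwq]; omega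
    -- range of w
    have hwl : 10 ^ k ≤ w := by
      rw [hp] at h1; omega
    have hwu : w ≤ 10 ^ (k + 1) := by
      rw [hp2] at h2; rw [hp]; omega
    rw [ih w hwl hwu]
    -- decompose value and w and hand everything to carry_step
    have hdmq := Int.ediv_add_emod value (10 ^ (k+1))
    have hr1 := Int.emod_nonneg value (by positivity : ((10:Int) ^ (k+1)) ≠ 0)
    have hr2 := Int.emod_lt_of_pos value (by positivity : (0:Int) < 10 ^ (k+1))
    set L := value / 10 ^ (k+1) with hL
    set r := value % 10 ^ (k+1) with hr
    have hlast : r % 10 = t := by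
      rw [hr, htdef, hp]
      exact Int.emod_emod_of_dvd value ⟨10 ^ k, rfl⟩
    have hdmr := Int.ediv_add_emod r 10
    have hs1 := Int.emod_nonneg r (by omega : (10:Int) ≠ 0)
    set s := r / 10 with hs
    have hrst : r = 10 * s + t := by omega
    have hdmw := Int.ediv_add_emod w (10 ^ k)
    have hu1 := Int.emod_nonneg w (by positivity : ((10:Int) ^ k) ≠ 0)
    have hu2 := Int.emod_lt_of_pos w (by positivity : (0:Int) < 10 ^ k)
    set W := w / 10 ^ k with hW
    set u := w % 10 ^ k with hu
    have hval' : value = 10 * (10 ^ k * L) + r := by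
      rw [← hdmq, hp]; ring
    have hw3 : w = 10 ^ k * L + s + b := by omega
    have hwcs : 10 ^ k * W + u = 10 ^ k * L + s + b := by omega
    have h9 := pow10_mod9 k
    rw [hp] at hr2 ⊢
    exact carry_step (10 ^ k) L r s t W u b hq h9 hr1 hr2 ht1 ht2 hbdef hrst hu1 hu2 hwcs

-- connecting everything: both sides equal gRec
theorem rounders_eq_gRec (value : Int) : rounders value = gRec value := by
  unfold rounders
  have := roundersLoop_eq value.toNat value le_rfl 0
  simpa using this

theorem gRec_eq_alt (value : Int) : gRec value = rounders_alt value := by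
  unfold rounders_alt
  by_cases h : value < 10
  · rw [gRec_small value h]; simp [h]
  · simp only [h, if_false]
    obtain ⟨k, hk1, hkp, hkl, hku⟩ := pow10B_spec value.toNat value le_rfl (by omega)
    have hppos : (0:Int) < 10 ^ k := by positivity
    rw [hkp, PySem.Int.floordiv_eq_ediv_of_pos hppos, PySem.Int.mod_eq_emod_of_pos hppos]
    exact gRec_closed k value hkl (by omega)

-- ===== VERDICT (by name: the statement is the Claim_ definition above) =====
theorem rounders_spec : Claim_equal_rounders := by
  intro value _
  unfold Spec_rounders
  rw [rounders_eq_gRec, gRec_eq_alt]
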